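-- pv_equiv track=rewrite | github.com/PlaviAjvar/AdventOfCode2019 | day_16a.py | solve
-- ===== SOURCE A (Python) =====
-- import copy
--
-- def apply_pattern(cum_sum, i, pattern_len, array_size):
--     def sum_c(left_idx, right_idx):
--         if right_idx >= array_size:
--             right_idx = array_size - 1
--         if left_idx >= array_size:
--             left_idx = array_size - 1
--         return cum_sum[right_idx] - cum_sum[left_idx]
--
--     new_value = 0
--
--     for j in range(0, array_size, pattern_len):
--         new_value += sum_c(j + i - 1, j + 2 * i - 1)
--         new_value -= sum_c(j + 3 * i - 1, j + 4 * i - 1)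
--
--     new_value = abs(new_value) % 10
--     return new_value
--
-- def solve(array):
--     num_iter = 100
--     array_size = len(array)
--
--     for iter in range(num_iter):
--         cum_sum = copy.deepcopy(array)
--         for i in range(1, array_size):
--             cum_sum[i] += cum_sum[i-1]
--         for i in range(1, array_size):
--             pattern_len = i * 4
--             array[i] = apply_pattern(cum_sum, i, pattern_len, array_size)
--
--     char_array = list(map(str, array))
--     return char_array
-- ===== SOURCE B (Python) =====
-- def solve(array):
--     # Naive per-phase double loop; returns fresh lists (A mutates its argument
--     # in place; the equivalence claimed is about the RETURN value only).
--     n = len(array)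
--     for _ in range(100):
--         new = array[:1]
--         for i in range(1, n):
--             t = 0
--             for p in range(n):
--                 m = (p // i) % 4
--                 if m == 1:
--                     t += array[p]
--                 elif m == 3:
--                     t -= array[p]
--             new.append(abs(t) % 10)
--         array = new
--     return [str(x) for x in array]
-- ===== Notes on version B (the rewrite author's own statement) =====
-- stated objective: simpler
-- what changed: A computes each phase via a cumulative-sum array and clamped block-range differences; B drops the prefix-sum machinery and directly sums every input position with its +1/-1 pattern coefficient (p//i)%4 in a plain double loop, building each phase's list afresh.
import Mathlib
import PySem

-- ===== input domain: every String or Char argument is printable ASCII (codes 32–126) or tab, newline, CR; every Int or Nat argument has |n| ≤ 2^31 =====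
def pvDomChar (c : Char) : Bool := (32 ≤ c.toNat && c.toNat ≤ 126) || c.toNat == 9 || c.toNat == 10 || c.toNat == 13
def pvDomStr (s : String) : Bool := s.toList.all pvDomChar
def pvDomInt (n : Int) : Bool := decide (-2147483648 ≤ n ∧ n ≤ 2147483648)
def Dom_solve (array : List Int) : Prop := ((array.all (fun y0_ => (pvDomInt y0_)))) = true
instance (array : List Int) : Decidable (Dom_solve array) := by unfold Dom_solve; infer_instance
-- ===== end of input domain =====

-- B replaces A's prefix-sum block trick with the naive per-index double loop
-- (objective: simpler). A mutates its argument in place, B builds fresh lists;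
-- the equivalence claimed is about the RETURN value only.

-- ===== PORT A =====
def sumC (cum : List Int) (arraySize l r : Nat) : Int :=
  let r' := if arraySize ≤ r then arraySize - 1 else r
  let l' := if arraySize ≤ l then arraySize - 1 else l
  cum.getD r' 0 - cum.getD l' 0

def applyPattern (cum : List Int) (i patternLen arraySize : Nat) : Int :=
  let nv := (List.range' 0 ((arraySize + patternLen - 1) / patternLen) patternLen).foldl
      (fun nv j => nv + sumC cum arraySize (j + i - 1) (j + 2 * i - 1)
                      - sumC cum arraySize (j + 3 * i - 1) (j + 4 * i - 1)) 0
  |nv| % 10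

def solve (array : List Int) : List String :=
  let arraySize := array.length
  let final := (List.range 100).foldl (fun arr _ =>
    let cumSum := (List.range' 1 (arraySize - 1)).foldl
        (fun c i => c.set i (c.getD i 0 + c.getD (i - 1) 0)) arr
    (List.range' 1 (arraySize - 1)).foldl
        (fun a i => a.set i (applyPattern cumSum i (i * 4) arraySize)) arr) array
  final.map PySem.Int.toStr

-- ===== PORT B =====
def solve_alt (array : List Int) : List String :=
  let n := array.length
  let final := (List.range 100).foldl (fun arr _ =>
    (List.range' 1 (n - 1)).foldl (fun new i =>
      new ++ [|(List.range n).foldl (fun t p =>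
          if p / i % 4 = 1 then t + arr.getD p 0
          else if p / i % 4 = 3 then t - arr.getD p 0
          else t) 0| % 10]) (arr.take 1)) array
  final.map PySem.Int.toStr

-- ===== PRECONDITION & SPEC =====
def Spec_solve (array : List Int) (out : List String) : Prop := out = solve_alt array
instance (array : List Int) (out : List String) : Decidable (Spec_solve array out) := by unfold Spec_solve; infer_instance

-- ===== CLAIM (what is proved, stated in full; the proofs are below) =====
def Claim_equal_solve : Prop := ∀ (array : List Int), Dom_solve array → Spec_solve array (solve array)

-- ===== LEMMAS AND PROOFS =====

/-- One phase of A: prefix sums, then rewrite positions 1..n-1. -/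
def pvPhaseA (n : Nat) (arr : List Int) : List Int :=
  let cumSum := (List.range' 1 (n - 1)).foldl
      (fun c i => c.set i (c.getD i 0 + c.getD (i - 1) 0)) arr
  (List.range' 1 (n - 1)).foldl
      (fun a i => a.set i (applyPattern cumSum i (i * 4) n)) arr

/-- One phase of B: direct coefficient sums appended after the kept head. -/
def pvPhaseB (n : Nat) (arr : List Int) : List Int :=
  (List.range' 1 (n - 1)).foldl (fun new i =>
    new ++ [|(List.range n).foldl (fun t p =>
        if p / i % 4 = 1 then t + arr.getD p 0
        else if p / i % 4 = 3 then t - arr.getD p 0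
        else t) 0| % 10]) (arr.take 1)

/-- The 0/±1 coefficient of input position `p` in output position `i` of a phase. -/
def pvCf (i p : Nat) : Int :=
  if p / i % 4 = 1 then 1 else if p / i % 4 = 3 then -1 else 0

/-- Sum of the first `k` entries. -/
def pvPre (arr : List Int) (k : Nat) : Int := (arr.take k).sum

lemma pv_solve_eq (array : List Int) :
    solve array
      = ((List.range 100).foldl (fun arr _ => pvPhaseA array.length arr) array).map
          PySem.Int.toStr := rfl

lemma pv_solve_alt_eq (array : List Int) :
    solve_alt array
      = ((List.range 100).foldl (fun arr _ => pvPhaseB array.length arr) array).map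
          PySem.Int.toStr := rfl

lemma pv_foldl_range_sum (g : Nat → Int) (n : Nat) :
    (List.range n).foldl (fun t p => t + g p) 0 = ∑ p ∈ Finset.range n, g p := by
  induction n with
  | zero => simp
  | succ m ih =>
      rw [List.range_succ, List.foldl_append]
      simp only [List.foldl_cons, List.foldl_nil]
      rw [ih, Finset.sum_range_succ]

lemma pv_foldl_range_sum_sub (X Y : Nat → Int) (B : Nat) :
    (List.range B).foldl (fun t k => t + X k - Y k) 0
      = ∑ k ∈ Finset.range B, (X k - Y k) := by
  induction B with
  | zero => simp
  | succ m ih =>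
      rw [List.range_succ, List.foldl_append]
      simp only [List.foldl_cons, List.foldl_nil]
      rw [ih, Finset.sum_range_succ]
      ring

lemma pv_coefSum_eq (arr : List Int) (i n : Nat) :
    (List.range n).foldl (fun t p =>
        if p / i % 4 = 1 then t + arr.getD p 0
        else if p / i % 4 = 3 then t - arr.getD p 0
        else t) 0
      = ∑ p ∈ Finset.range n, pvCf i p * arr.getD p 0 := by
  have hbody : (fun (t : Int) (p : Nat) =>
      if p / i % 4 = 1 then t + arr.getD p 0
      else if p / i % 4 = 3 then t - arr.getD p 0
      else t) = fun t p => t + pvCf i p * arr.getD p 0 := by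
    funext t p
    unfold pvCf
    split_ifs <;> ring
  rw [hbody, pv_foldl_range_sum]

lemma pv_range'_step (s B : Nat) :
    List.range' 0 B s = (List.range B).map (fun k => s * k) := by
  induction B with
  | zero => simp
  | succ m ih => rw [List.range'_concat, List.range_succ, List.map_append, ih]; simp

lemma pv_pre_sum (arr : List Int) :
    ∀ m, m ≤ arr.length → pvPre arr m = ∑ p ∈ Finset.range m, arr.getD p 0 := by
  intro m
  induction m with
  | zero => intro _; simp [pvPre]
  | succ k ih =>
      intro hk
      have hk' : k < arr.length := by omega
      have hgd : arr.getD k 0 = arr[k] := List.getD_eq_getElem arr 0 hk'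
      unfold pvPre at *
      rw [List.take_add_one, List.getElem?_eq_getElem hk']
      rw [Option.toList_some, List.sum_append, List.sum_cons, List.sum_nil,
          ih (by omega), Finset.sum_range_succ, hgd, add_zero]

lemma pv_pre_succ (arr : List Int) (k : Nat) (hk : k < arr.length) :
    pvPre arr (k + 1) = pvPre arr k + arr.getD k 0 := by
  rw [pv_pre_sum arr (k + 1) (by omega), pv_pre_sum arr k (by omega),
      Finset.sum_range_succ]

lemma pv_set_map_range (f : Nat → Int) (n j : Nat) (v : Int) :
    ((List.range n).map f).set j v
      = (List.range n).map (fun k => if k = j then v else f k) := by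
  apply List.ext_getElem
  · simp
  · intro k hk hk'
    simp only [List.length_set, List.length_map, List.length_range] at hk
    rw [List.getElem_set]
    by_cases h : j = k
    · subst h
      simp [List.getElem_map, List.getElem_range]
    · rw [if_neg h]
      have hne : k ≠ j := fun hh => h hh.symm
      simp [List.getElem_map, List.getElem_range, hne]

lemma pv_cum_aux (arr : List Int) (n : Nat) (h : arr.length = n) :
    ∀ m, m ≤ n - 1 →
      (List.range' 1 m).foldl (fun c i => c.set i (c.getD i 0 + c.getD (i - 1) 0)) arr
      = (List.range n).map (fun k => if k ≤ m then pvPre arr (k + 1) else arr.getD k 0) := by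
  intro m
  induction m with
  | zero =>
      intro _
      apply List.ext_getElem
      · simp [h]
      · intro k hk hk'
        simp only [List.length_map, List.length_range] at hk'
        have hkl : k < arr.length := by omega
        simp only [List.range'_zero, List.foldl_nil, List.getElem_map, List.getElem_range]
        by_cases hk0 : k = 0
        · subst hk0
          rw [if_pos (le_refl 0)]
          have h1 : pvPre arr 1 = arr.getD 0 0 := by
            rw [pv_pre_succ arr 0 hkl]
            simp [pvPre]
          rw [h1, List.getD_eq_getElem arr 0 hkl]
        · rw [if_neg (by omega), List.getD_eq_getElem arr 0 hkl]
  | succ m ih =>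
      intro hm
      rw [List.range'_1_concat, List.foldl_append, ih (by omega)]
      simp only [List.foldl_cons, List.foldl_nil]
      rw [pv_set_map_range]
      have h1m : 1 + m < n := by omega
      have hmn : m < n := by omega
      have e1 : ((List.range n).map
          (fun k => if k ≤ m then pvPre arr (k + 1) else arr.getD k 0)).getD (1 + m) 0
          = arr.getD (1 + m) 0 := by
        rw [PySem.List.getD_map_range _ _ _ _ h1m, if_neg (by omega)]
      have e2 : ((List.range n).map
          (fun k => if k ≤ m then pvPre arr (k + 1) else arr.getD k 0)).getD (1 + m - 1) 0
          = pvPre arr (m + 1) := by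
        have hidx : 1 + m - 1 = m := by omega
        rw [hidx, PySem.List.getD_map_range _ _ _ _ hmn, if_pos (by omega)]
      rw [e1, e2]
      apply List.map_congr_left
      intro k hk
      rw [List.mem_range] at hk
      by_cases hkm : k = 1 + m
      · subst hkm
        rw [if_pos rfl, if_pos (by omega)]
        have e3 : 1 + m = m + 1 := by omega
        rw [e3, pv_pre_succ arr (m + 1) (by omega)]
        ring
      · rw [if_neg hkm]
        by_cases hle : k ≤ m
        · rw [if_pos hle, if_pos (by omega)]
        · rw [if_neg hle, if_neg (by omega)]

lemma pv_cum_eq (arr : List Int) (n : Nat) (h : arr.length = n) :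
    (List.range' 1 (n - 1)).foldl (fun c i => c.set i (c.getD i 0 + c.getD (i - 1) 0)) arr
    = (List.range n).map (fun k => pvPre arr (k + 1)) := by
  rw [pv_cum_aux arr n h (n - 1) (le_refl _)]
  apply List.map_congr_left
  intro k hk
  rw [List.mem_range] at hk
  rw [if_pos (by omega)]

lemma pv_sumC_eq (arr : List Int) (n : Nat) (_hn : 1 ≤ n) (l r : Nat) :
    sumC ((List.range n).map (fun k => pvPre arr (k + 1))) n l r
      = pvPre arr (min (r + 1) n) - pvPre arr (min (l + 1) n) := by
  unfold sumC
  have key : ∀ j : Nat,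
      ((List.range n).map (fun k => pvPre arr (k + 1))).getD
        (if n ≤ j then n - 1 else j) 0 = pvPre arr (min (j + 1) n) := by
    intro j
    by_cases hj : n ≤ j
    · rw [if_pos hj, PySem.List.getD_map_range _ _ _ _ (by omega : n - 1 < n)]
      congr 1
      omega
    · rw [if_neg hj, PySem.List.getD_map_range _ _ _ _ (by omega : j < n)]
      congr 1
      omega
  simp only [key]

lemma pv_interval (arr : List Int) (n : Nat) (h : arr.length = n) (a b : Nat) (hab : a ≤ b) :
    pvPre arr (min b n) - pvPre arr (min a n)
      = ∑ p ∈ Finset.range n, (if a ≤ p ∧ p < b then arr.getD p 0 else 0) := by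
  have hfilter : (Finset.range n).filter (fun p => a ≤ p ∧ p < b)
      = Finset.Ico (min a n) (min b n) := by
    apply Finset.ext
    intro p
    simp only [Finset.mem_filter, Finset.mem_range, Finset.mem_Ico]
    omega
  rw [Finset.sum_ite, Finset.sum_const, smul_zero, add_zero, hfilter,
      Finset.sum_Ico_eq_sub _ (by omega : min a n ≤ min b n),
      pv_pre_sum arr (min b n) (by omega), pv_pre_sum arr (min a n) (by omega)]

lemma pv_block_coef (i n p : Nat) (hi : 1 ≤ i) (_hn : 1 ≤ n) (hp : p < n) :
    ∑ k ∈ Finset.range ((n + i * 4 - 1) / (i * 4)),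
      ((if i * 4 * k + i ≤ p ∧ p < i * 4 * k + 2 * i then (1 : Int) else 0)
        - (if i * 4 * k + 3 * i ≤ p ∧ p < i * 4 * k + 4 * i then (1 : Int) else 0))
      = pvCf i p := by
  have h4i : 0 < i * 4 := by omega
  have hdm := Nat.div_add_mod p (i * 4)
  have hml : p % (i * 4) < i * 4 := Nat.mod_lt _ h4i
  set q := p / (i * 4) with hq
  have hqr : i * 4 * q ≤ p ∧ p < i * 4 * q + i * 4 := by omega
  have hqmem : q ∈ Finset.range ((n + i * 4 - 1) / (i * 4)) := by
    rw [Finset.mem_range]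
    have hstep : q + 1 ≤ (n + i * 4 - 1) / (i * 4) := by
      rw [Nat.le_div_iff_mul_le h4i]
      have h1 : (q + 1) * (i * 4) = i * 4 * q + i * 4 := by ring
      omega
    omega
  rw [Finset.sum_eq_single_of_mem q hqmem]
  · set r := p - i * 4 * q with hr
    have hrlt : r < i * 4 := by omega
    have hdiv : p / i = 4 * q + r / i := by
      have hrew : p = r + i * (4 * q) := by
        have he : i * (4 * q) = i * 4 * q := by ring
        omega
      rw [hrew, Nat.add_mul_div_left _ _ (by omega : 0 < i)]
      ring
    have hri : r / i < 4 := by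
      rw [Nat.div_lt_iff_lt_mul (by omega : 0 < i)]
      omega
    have hmod : p / i % 4 = r / i := by
      rw [hdiv, Nat.add_comm, Nat.add_mul_mod_self_left]
      exact Nat.mod_eq_of_lt hri
    have hrdec := Nat.div_add_mod r i
    have hrmod : r % i < i := Nat.mod_lt _ (by omega)
    have hlow : i * (r / i) ≤ r ∧ r < i * (r / i) + i := by
      constructor <;> omega
    have hp_eq : i * 4 * q + r = p := by omega
    unfold pvCf
    rw [hmod]
    rcases (show r / i = 0 ∨ r / i = 1 ∨ r / i = 2 ∨ r / i = 3 by omega) with hc | hc | hc | hc <;>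
      rw [hc] at hlow ⊢ <;>
      split_ifs <;> first | contradiction | omega
  · intro k hk hkq
    rcases Nat.lt_or_ge k q with hlt | hge
    · have hle : (i * 4) * (k + 1) ≤ (i * 4) * q := Nat.mul_le_mul_left _ (by omega)
      have h1 : i * 4 * k + i * 4 ≤ i * 4 * q := by
        have h2 : (i * 4) * (k + 1) = i * 4 * k + i * 4 := by ring
        omega
      rw [if_neg (by omega), if_neg (by omega)]
      ring
    · have hgt : q < k := by omega
      have hle : (i * 4) * (q + 1) ≤ (i * 4) * k := Nat.mul_le_mul_left _ (by omega)
      have h1 : i * 4 * q + i * 4 ≤ i * 4 * k := by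
        have h2 : (i * 4) * (q + 1) = i * 4 * q + i * 4 := by ring
        omega
      rw [if_neg (by omega), if_neg (by omega)]
      ring

lemma pv_applyPattern_eq (arr : List Int) (n i : Nat) (h : arr.length = n)
    (hi : 1 ≤ i) (hin : i < n) :
    applyPattern ((List.range n).map (fun k => pvPre arr (k + 1))) i (i * 4) n
      = |(List.range n).foldl (fun t p =>
          if p / i % 4 = 1 then t + arr.getD p 0
          else if p / i % 4 = 3 then t - arr.getD p 0
          else t) 0| % 10 := by
  have hn : 1 ≤ n := by omega
  show |(List.range' 0 ((n + i * 4 - 1) / (i * 4)) (i * 4)).foldl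
      (fun nv j => nv + sumC ((List.range n).map (fun k => pvPre arr (k + 1))) n
            (j + i - 1) (j + 2 * i - 1)
          - sumC ((List.range n).map (fun k => pvPre arr (k + 1))) n
            (j + 3 * i - 1) (j + 4 * i - 1)) 0| % 10 = _
  rw [pv_coefSum_eq]
  congr 1
  congr 1
  rw [pv_range'_step (i * 4) ((n + i * 4 - 1) / (i * 4)), List.foldl_map]
  refine Eq.trans (pv_foldl_range_sum_sub
      (fun k => sumC ((List.range n).map (fun k => pvPre arr (k + 1))) n
          (i * 4 * k + i - 1) (i * 4 * k + 2 * i - 1))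
      (fun k => sumC ((List.range n).map (fun k => pvPre arr (k + 1))) n
          (i * 4 * k + 3 * i - 1) (i * 4 * k + 4 * i - 1))
      ((n + i * 4 - 1) / (i * 4))) ?_
  have step1 : ∀ k ∈ Finset.range ((n + i * 4 - 1) / (i * 4)),
      sumC ((List.range n).map (fun k => pvPre arr (k + 1))) n
          (i * 4 * k + i - 1) (i * 4 * k + 2 * i - 1)
        - sumC ((List.range n).map (fun k => pvPre arr (k + 1))) n
          (i * 4 * k + 3 * i - 1) (i * 4 * k + 4 * i - 1)
      = ∑ p ∈ Finset.range n,
          ((if i * 4 * k + i ≤ p ∧ p < i * 4 * k + 2 * i then (1 : Int) else 0)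
            - (if i * 4 * k + 3 * i ≤ p ∧ p < i * 4 * k + 4 * i then (1 : Int) else 0))
          * arr.getD p 0 := by
    intro k _
    rw [pv_sumC_eq arr n hn, pv_sumC_eq arr n hn]
    have e1 : i * 4 * k + 2 * i - 1 + 1 = i * 4 * k + 2 * i := by omega
    have e2 : i * 4 * k + i - 1 + 1 = i * 4 * k + i := by omega
    have e3 : i * 4 * k + 4 * i - 1 + 1 = i * 4 * k + 4 * i := by omega
    have e4 : i * 4 * k + 3 * i - 1 + 1 = i * 4 * k + 3 * i := by omega
    rw [e1, e2, e3, e4,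
        pv_interval arr n h (i * 4 * k + i) (i * 4 * k + 2 * i) (by omega),
        pv_interval arr n h (i * 4 * k + 3 * i) (i * 4 * k + 4 * i) (by omega),
        ← Finset.sum_sub_distrib]
    apply Finset.sum_congr rfl
    intro p _
    split_ifs <;> ring
  refine Eq.trans (Finset.sum_congr rfl step1) ?_
  rw [Finset.sum_comm]
  apply Finset.sum_congr rfl
  intro p hp
  rw [← Finset.sum_mul, pv_block_coef i n p hi hn (Finset.mem_range.mp hp)]

lemma pv_setfold_aux (f : Nat → Int) (arr : List Int) (n : Nat) (h : arr.length = n) :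
    ∀ m, m ≤ n - 1 →
      (List.range' 1 m).foldl (fun a i => a.set i (f i)) arr
      = arr.take 1 ++ (List.range' 1 m).map f ++ arr.drop (m + 1) := by
  intro m
  induction m with
  | zero =>
      intro _
      simp only [List.range'_zero, List.foldl_nil, List.map_nil, List.append_nil,
        Nat.zero_add]
      exact (List.take_append_drop 1 arr).symm
  | succ m ih =>
      intro hm
      have hn2 : m + 2 ≤ n := by omega
      rw [List.range'_1_concat, List.foldl_append, ih (by omega)]
      simp only [List.foldl_cons, List.foldl_nil]
      have hlenL : (arr.take 1 ++ (List.range' 1 m).map f).length = 1 + m := by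
        simp only [List.length_append, List.length_take, List.length_map,
          List.length_range']
        omega
      rw [List.set_append, if_neg (by rw [hlenL]; omega), hlenL, Nat.sub_self]
      rw [List.drop_eq_getElem_cons (show m + 1 < arr.length by omega),
          List.set_cons_zero]
      rw [List.map_append]
      simp [List.append_assoc]

lemma pv_setfold_eq (f : Nat → Int) (arr : List Int) (n : Nat) (h : arr.length = n) :
    (List.range' 1 (n - 1)).foldl (fun a i => a.set i (f i)) arr
      = arr.take 1 ++ (List.range' 1 (n - 1)).map f := by
  rw [pv_setfold_aux f arr n h (n - 1) (le_refl _)]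
  rcases Nat.eq_zero_or_pos n with h0 | h0
  · subst h0
    have hnil : arr = [] := List.eq_nil_of_length_eq_zero h
    simp [hnil]
  · have he : n - 1 + 1 = n := by omega
    rw [he, ← h, List.drop_length, List.append_nil]

lemma pv_phase_eq (arr : List Int) (n : Nat) (h : arr.length = n) :
    pvPhaseA n arr = pvPhaseB n arr := by
  have hA : pvPhaseA n arr
      = arr.take 1 ++ (List.range' 1 (n - 1)).map
          (fun i => applyPattern ((List.range n).map (fun k => pvPre arr (k + 1)))
            i (i * 4) n) := by
    show (List.range' 1 (n - 1)).foldl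
        (fun a i => a.set i (applyPattern
          ((List.range' 1 (n - 1)).foldl
            (fun c i => c.set i (c.getD i 0 + c.getD (i - 1) 0)) arr) i (i * 4) n)) arr
      = _
    rw [pv_cum_eq arr n h]
    exact pv_setfold_eq _ arr n h
  have hB : pvPhaseB n arr
      = arr.take 1 ++ (List.range' 1 (n - 1)).map
          (fun i => |(List.range n).foldl (fun t p =>
              if p / i % 4 = 1 then t + arr.getD p 0
              else if p / i % 4 = 3 then t - arr.getD p 0
              else t) 0| % 10) := by
    exact PySem.List.foldl_append_singleton_eq_map _ _ _
  rw [hA, hB]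
  congr 1
  apply List.map_congr_left
  intro i hi
  rw [List.mem_range'_1] at hi
  exact pv_applyPattern_eq arr n i h (by omega) (by omega)

lemma pv_phase_len (arr : List Int) (n : Nat) (h : arr.length = n) :
    (pvPhaseB n arr).length = n := by
  unfold pvPhaseB
  rw [PySem.List.foldl_append_singleton_eq_map]
  simp only [List.length_append, List.length_take, List.length_map, List.length_range']
  omega

-- ===== VERDICT (by name: the statement is the Claim_ definition above) =====
theorem solve_spec : Claim_equal_solve := by
  unfold Claim_equal_solve Spec_solve
  intro array _
  rw [pv_solve_eq, pv_solve_alt_eq]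
  suffices hfold : ∀ (l : List Nat) (arr : List Int), arr.length = array.length →
      l.foldl (fun a _ => pvPhaseA array.length a) arr
        = l.foldl (fun a _ => pvPhaseB array.length a) arr by
    rw [hfold _ _ rfl]
  intro l
  induction l with
  | nil => intro arr _; rfl
  | cons x xs ih =>
      intro arr hl
      simp only [List.foldl_cons]
      rw [pv_phase_eq arr array.length hl]
      exact ih _ (pv_phase_len arr array.length hl)
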